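-- pv_equiv track=rewrite | github.com/RiyaThakore/Competitive-Programmin | String/form-a-palindrome.py | check_same_letter
-- ===== SOURCE A (Python) =====
-- def check_same_letter(word):
--   for j in range(len(word)):
--     if word[len(word)-(j+1)] == word[len(word)-(j+2)]:
--       continue
--     else:
--       idx=word.index(word[len(word)-(j+1)])
--       return (idx)
--       break
-- ===== SOURCE B (Python) =====
-- def check_same_letter(word):
--     if not word or word.count(word[0]) == len(word):
--         return None
--     return word.index(word[-1])
-- ===== Notes on version B (the rewrite author's own statement) =====
-- stated objective: simpler
-- what changed: Replaces the backward adjacent-pair scan (plus an index search in the loop body) with a direct observation: the answer is the first occurrence of the last character, unless the word is empty or all one character (then None).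
import Mathlib
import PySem

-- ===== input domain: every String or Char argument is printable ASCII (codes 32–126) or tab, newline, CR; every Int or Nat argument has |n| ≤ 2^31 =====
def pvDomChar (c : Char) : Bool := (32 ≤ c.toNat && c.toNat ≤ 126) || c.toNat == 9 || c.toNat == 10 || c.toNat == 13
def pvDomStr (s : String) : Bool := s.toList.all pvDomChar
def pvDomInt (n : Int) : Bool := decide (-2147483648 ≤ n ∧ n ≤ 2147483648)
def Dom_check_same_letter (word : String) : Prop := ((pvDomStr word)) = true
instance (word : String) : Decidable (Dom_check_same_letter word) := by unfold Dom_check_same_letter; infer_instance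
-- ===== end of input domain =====

-- B: the answer is simply the first occurrence of the last character, unless the
-- word is empty or all one character (then None); same return value as A everywhere.

-- ===== PORT A =====
-- the for-loop over range(len(word)); on an (unreachable) IndexError/ValueError returns none
def cslLoop (w : List Char) : List Int → Option Int
  | [] => none
  | j :: rest =>
    match PySem.List.pyGet? w ((w.length : Int) - (j + 1)),
          PySem.List.pyGet? w ((w.length : Int) - (j + 2)) with
    | some a, some b =>
      if a == b then cslLoop w rest
      else (PySem.List.index? w a).map (fun i => (i : Int))
    | _, _ => none  -- IndexError (unreachable for j in range(len(word)))

def check_same_letter (word : String) : Option Int :=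
  let w := word.toList
  cslLoop w (PySem.List.pyRange 0 (w.length : Int) 1)

-- ===== PORT B =====
def check_same_letter_alt (word : String) : Option Int :=
  let w := word.toList
  match w with
  | [] => none
  | c :: _ =>
    if PySem.List.count w c == w.length then none
    else
      match PySem.List.pyGet? w (-1) with
      | some last => (PySem.List.index? w last).map (fun i => (i : Int))
      | none => none

-- ===== PRECONDITION & SPEC =====
def Spec_check_same_letter (word : String) (out : Option Int) : Prop := out = check_same_letter_alt word
instance (word : String) (out : Option Int) : Decidable (Spec_check_same_letter word out) := by unfold Spec_check_same_letter; infer_instance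

-- ===== CLAIM (what is proved, stated in full; the proofs are below) =====
def Claim_equal_check_same_letter : Prop := ∀ (word : String), Dom_check_same_letter word → Spec_check_same_letter word (check_same_letter word)

-- ===== LEMMAS AND PROOFS =====

-- ===== VERDICT (by name: the statement is the Claim_ definition above) =====
-- A's loop returns none when every character equals c
lemma cslLoop_all_eq (w : List Char) (c : Char) (hall : ∀ x ∈ w, x = c) :
    ∀ js, cslLoop w js = none := by
  intro js
  induction js with
  | nil => rfl
  | cons j rest ih =>
    simp only [cslLoop]
    cases h1 : PySem.List.pyGet? w ((w.length : Int) - (j + 1)) with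
    | none => rfl
    | some a =>
      cases h2 : PySem.List.pyGet? w ((w.length : Int) - (j + 2)) with
      | none => rfl
      | some b =>
        have ha := hall a (PySem.List.mem_of_pyGet?_eq_some w h1)
        have hb := hall b (PySem.List.mem_of_pyGet?_eq_some w h2)
        subst ha hb
        simp [ih]

-- the backward scan: if the last j+1 characters all equal c (the last character),
-- and not all characters equal c, the loop from j returns the first index of c
lemma cslLoop_spec (w : List Char) (c : Char) (j : Nat) (hj : j < w.length)
    (hsuf : ∀ i (hi : i < w.length), w.length - (j + 1) ≤ i → w[i] = c)
    (hne : ¬ ∀ x ∈ w, x = c) :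
    cslLoop w (PySem.List.pyRange (j : Int) (w.length : Int) 1) =
      (PySem.List.index? w c).map (fun i => (i : Int)) := by
  have hn : (j : Int) < (w.length : Int) := by exact_mod_cast hj
  rw [PySem.List.pyRange_one_cons hn]
  have hidx1 : (w.length : Int) - ((j : Int) + 1) = ((w.length - (j + 1) : Nat) : Int) := by
    omega
  have h1 : PySem.List.pyGet? w ((w.length : Int) - ((j : Int) + 1)) =
      some (w[w.length - (j + 1)]'(by omega)) := by
    rw [hidx1, PySem.List.pyGet?_natCast]
    exact List.getElem?_eq_getElem (by omega)
  have ha : w[w.length - (j + 1)]'(by omega) = c :=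
    hsuf _ (by omega) (le_refl _)
  by_cases hlast : j + 1 < w.length
  · -- second index still nonnegative
    have hidx2 : (w.length : Int) - ((j : Int) + 2) = ((w.length - (j + 2) : Nat) : Int) := by
      omega
    have h2 : PySem.List.pyGet? w ((w.length : Int) - ((j : Int) + 2)) =
        some (w[w.length - (j + 2)]'(by omega)) := by
      rw [hidx2, PySem.List.pyGet?_natCast]
      exact List.getElem?_eq_getElem (by omega)
    by_cases heq : w[w.length - (j + 2)]'(by omega) = c
    · have hbeq : (w[w.length - (j + 1)]'(by omega) == w[w.length - (j + 2)]'(by omega)) = true := by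
        rw [ha, heq]; simp
      simp only [cslLoop, h1, h2, hbeq, if_true]
      have := cslLoop_spec w c (j + 1) hlast
        (by
          intro i hi hle
          by_cases hcase : w.length - (j + 1) ≤ i
          · exact hsuf i hi hcase
          · have : i = w.length - (j + 2) := by omega
            subst this; exact heq)
        hne
      have hcast : ((j : Int) + 1) = (((j + 1 : Nat)) : Int) := by omega
      rw [hcast]
      exact this
    · have hbeq : (w[w.length - (j + 1)]'(by omega) == w[w.length - (j + 2)]'(by omega)) = false := by
        rw [ha]
        exact beq_false_of_ne (fun h => heq (h.symm))
      simp only [cslLoop, h1, h2, hbeq, Bool.false_eq_true, if_false]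
      rw [ha]
  · -- j = length - 1 : all characters equal c, contradiction
    exfalso
    apply hne
    intro x hx
    obtain ⟨i, hi, rfl⟩ := List.mem_iff_getElem.mp hx
    exact hsuf i hi (by omega)

-- all-equal-to-head iff all-equal-to-last, for a cons list
lemma all_eq_head_iff_all_eq_last (c : Char) (rest : List Char) :
    (∀ x ∈ c :: rest, x = c) ↔
    (∀ x ∈ c :: rest, x = (c :: rest).getLast (by simp)) := by
  constructor
  · intro h x hx
    rw [h x hx, h _ (List.getLast_mem _)]
  · intro h x hx
    rw [h x hx, ← h c (by simp)]

theorem check_same_letter_spec : Claim_equal_check_same_letter := by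
  intro word _
  unfold Spec_check_same_letter check_same_letter check_same_letter_alt
  cases hw : word.toList with
  | nil => simp [cslLoop, PySem.List.pyRange_one_eq_nil]
  | cons c rest =>
    by_cases hall : ∀ x ∈ c :: rest, x = c
    · -- all characters equal: both none
      have hcount : List.count c (c :: rest) = (c :: rest).length :=
        List.count_eq_length.mpr (fun b hb => (hall b hb).symm)
      rw [cslLoop_all_eq (c :: rest) c hall]
      simp [PySem.List.count_eq, hcount]
    · -- not all equal
      have hnil : (c :: rest) ≠ ([] : List Char) := by simp
      have hne : ¬ ∀ x ∈ c :: rest, x = (c :: rest).getLast hnil := by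
        intro h
        exact hall ((all_eq_head_iff_all_eq_last c rest).mpr h)
      have hcount : List.count c (c :: rest) ≠ (c :: rest).length := by
        intro h
        exact hall (fun b hb => (List.count_eq_length.mp h b hb).symm)
      have hget : PySem.List.pyGet? (c :: rest) (-1) = some ((c :: rest).getLast hnil) := by
        rw [PySem.List.pyGet?_neg_one]
        exact List.getLast?_eq_some_getLast hnil
      have hsuf : ∀ i (hi : i < (c :: rest).length),
          (c :: rest).length - (0 + 1) ≤ i → (c :: rest)[i] = (c :: rest).getLast hnil := by
        intro i hi hle
        have : i = (c :: rest).length - 1 := by omega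
        subst this
        exact (List.getLast_eq_getElem hnil).symm
      have hmain := cslLoop_spec (c :: rest) ((c :: rest).getLast hnil) 0 (by simp) hsuf hne
      simp only [Nat.cast_zero] at hmain
      rw [hmain]
      have hcond : (PySem.List.count (c :: rest) c == (c :: rest).length) = false := by
        simp [PySem.List.count_eq]
        simpa [PySem.List.count_eq] using hcount
      simp only [hcond, hget, Bool.false_eq_true, if_false]
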